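-- pv_equiv track=rewrite | github.com/volkamerlab/structuralalignment | superposer/cli.py | parse_method_options
-- ===== SOURCE A (Python) =====
-- def parse_method_options(string):
--     options = {}
--     if not string or not string.strip():
--         return options
--     fields = string.split(";")
--     # use YAML (through ruamel_yaml) to parse each field
--     for field in fields:
--         # TODO: REPLACE WITH some_ruamel_yaml_function(field)  # -> {key: value}
--         minidict = {"dummy": "value"}
--         options.update(minidict)
--     return options
-- ===== SOURCE B (Python) =====
-- def parse_method_options(string):
--     # One character scan instead of strip()+split(";")+update loop:
--     # there is content iff some character is not whitespace, and then the
--     # parsed options are the closed-form constant the loop always produces.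
--     if string is not None and any(not c.isspace() for c in string):
--         return {"dummy": "value"}
--     return {}
-- ===== Notes on version B (the rewrite author's own statement) =====
-- stated objective: simpler
-- what changed: Replaced A's strip()-based blank test plus split(';') and per-field dict-update loop by a single character scan (any non-whitespace char) that returns the closed-form constant {"dummy": "value"}; no splitting, no dict building, no loop over fields.
import Mathlib
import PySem

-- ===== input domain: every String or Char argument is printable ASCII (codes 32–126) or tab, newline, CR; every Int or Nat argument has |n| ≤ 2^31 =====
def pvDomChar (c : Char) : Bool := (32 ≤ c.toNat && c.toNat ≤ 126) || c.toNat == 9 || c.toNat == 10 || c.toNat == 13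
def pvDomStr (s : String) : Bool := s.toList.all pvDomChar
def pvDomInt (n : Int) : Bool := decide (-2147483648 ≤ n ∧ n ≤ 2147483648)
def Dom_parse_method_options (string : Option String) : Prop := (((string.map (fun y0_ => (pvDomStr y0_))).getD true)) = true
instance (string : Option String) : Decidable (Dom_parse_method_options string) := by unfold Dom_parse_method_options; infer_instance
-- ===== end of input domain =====

-- B replaces A's strip()+split(";")+dict-update loop by a single character scan
-- (any non-whitespace char ⇒ the constant result); objective: simpler.

-- ===== PORT A =====
def parse_method_options (string : Option String) : List (String × String) :=
  let options : PySem.Dict String String := PySem.Dict.empty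
  match string with
  | none => options.items
  | some s =>
    if s = "" ∨ PySem.Str.strip s = "" then options.items
    else
      let fields : List (List Char) := PySem.Chars.splitOn s.toList [';']
      (fields.foldl (fun d _field => d.insert "dummy" "value") options).items

-- ===== PORT B =====
def parse_method_options_alt (string : Option String) : List (String × String) :=
  match string with
  | none => []
  | some s =>
    if s.toList.any (fun c => !PySem.Chars.isspace c) then [("dummy", "value")]
    else []

-- ===== PRECONDITION & SPEC =====
def Spec_parse_method_options (string : Option String) (out : List (String × String)) : Prop := out = parse_method_options_alt string
instance (string : Option String) (out : List (String × String)) : Decidable (Spec_parse_method_options string out) := by unfold Spec_parse_method_options; infer_instance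

-- ===== CLAIM (what is proved, stated in full; the proofs are below) =====
def Claim_equal_parse_method_options : Prop := ∀ (string : Option String), Dom_parse_method_options string → Spec_parse_method_options string (parse_method_options string)

-- ===== LEMMAS AND PROOFS =====

-- stripping yields the empty string exactly when every character is whitespace
theorem strip_eq_nil_iff (l : List Char) :
    PySem.Chars.strip l = [] ↔ ∀ c ∈ l, PySem.Chars.isspace c = true := by
  unfold PySem.Chars.strip PySem.Chars.rstrip PySem.Chars.lstrip
  rw [List.reverse_eq_nil_iff, List.dropWhile_eq_nil_iff]
  simp only [List.mem_reverse]
  constructor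
  · intro h c hc
    rcases List.mem_append.mp ((List.takeWhile_append_dropWhile
        (p := PySem.Chars.isspace) (l := l)) ▸ hc) with h1 | h2
    · exact List.mem_takeWhile_imp h1
    · exact h c h2
  · intro h c hc
    exact h c (List.dropWhile_subset _ hc)

theorem str_strip_eq_empty_iff (s : String) :
    PySem.Str.strip s = "" ↔ ∀ c ∈ s.toList, PySem.Chars.isspace c = true := by
  rw [← strip_eq_nil_iff]
  constructor
  · intro h; rw [← PySem.Str.toList_strip, h]; rfl
  · intro h
    have := PySem.Str.toList_strip s
    rw [h] at this
    exact String.toList_eq_nil_iff.mp this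

-- splitOn's worker never returns the empty list
theorem splitOn_go_ne_nil (sep : List Char) (fuel : Nat) (l cur : List Char)
    (acc : List (List Char)) : PySem.Chars.splitOn.go sep fuel l cur acc ≠ [] := by
  induction fuel generalizing l cur acc with
  | zero => simp [PySem.Chars.splitOn.go]
  | succ n ih =>
    cases l with
    | nil => simp [PySem.Chars.splitOn.go]
    | cons c rest =>
      rw [PySem.Chars.splitOn.go]
      split_ifs with h
      · exact ih _ _ _
      · exact ih _ _ _

theorem splitOn_ne_nil (s sep : List Char) : PySem.Chars.splitOn s sep ≠ [] :=
  splitOn_go_ne_nil sep _ s [] []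

-- inserting "dummy" again leaves the one-entry dict unchanged, so the fold is constant
theorem foldl_insert_dummy (l : List (List Char)) :
    l.foldl (fun (d : PySem.Dict String String) (_ : List Char) => d.insert "dummy" "value")
      (PySem.Dict.mk [("dummy", "value")]) = PySem.Dict.mk [("dummy", "value")] := by
  induction l with
  | nil => rfl
  | cons x xs ih =>
    have h : (PySem.Dict.mk [("dummy", "value")]).insert "dummy" "value"
        = PySem.Dict.mk [("dummy", "value")] := by decide
    simpa [h] using ih

theorem foldl_insert_dummy_nonempty (x : List Char) (xs : List (List Char)) :
    ((x :: xs).foldl (fun (d : PySem.Dict String String) (_ : List Char) => d.insert "dummy" "value")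
      PySem.Dict.empty).items = [("dummy", "value")] := by
  have h0 : (PySem.Dict.empty : PySem.Dict String String).insert "dummy" "value"
      = PySem.Dict.mk [("dummy", "value")] := by decide
  simp only [List.foldl_cons, h0, foldl_insert_dummy]

-- ===== VERDICT (by name: the statement is the Claim_ definition above) =====
theorem parse_method_options_spec : Claim_equal_parse_method_options := by
  intro string _
  unfold Spec_parse_method_options parse_method_options parse_method_options_alt
  cases string with
  | none => rfl
  | some s =>
    by_cases h : s = "" ∨ PySem.Str.strip s = ""
    · have hall : ∀ c ∈ s.toList, PySem.Chars.isspace c = true := by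
        rcases h with h | h
        · subst h; intro c hc; cases hc
        · exact (str_strip_eq_empty_iff s).mp h
      have hany : s.toList.any (fun c => !PySem.Chars.isspace c) = false := by
        simp only [List.any_eq_false, Bool.not_eq_true', Bool.not_eq_false]
        exact hall
      simp [h, hany, PySem.Dict.empty]
    · have hne : ¬ (∀ c ∈ s.toList, PySem.Chars.isspace c = true) := by
        intro hall
        exact h (Or.inr ((str_strip_eq_empty_iff s).mpr hall))
      have hany : s.toList.any (fun c => !PySem.Chars.isspace c) = true := by
        simp only [List.any_eq_true, Bool.not_eq_true']
        rw [not_forall] at hne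
        obtain ⟨c, hc⟩ := hne
        rw [Classical.not_imp] at hc
        exact ⟨c, hc.1, by simpa using hc.2⟩
      simp only [h, if_false, hany, if_true]
      rcases hsplit : PySem.Chars.splitOn s.toList [';'] with _ | ⟨x, xs⟩
      · exact absurd hsplit (splitOn_ne_nil _ _)
      · exact foldl_insert_dummy_nonempty x xs
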